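-- pv_equiv track=rewrite | github.com/smdelacruz/codewars | kkbox_1.py | solution
-- ===== SOURCE A (Python) =====
-- def solution(S):
--     a = 'aa'
--     count_a = S.count('a')
--     rewrite = ""
--     if 'aaa' in S: return -1
--     for i in S:
--         if i != 'a':
--             rewrite += a+i
--     new_string = rewrite + a
--     return new_string.count('a') - count_a
-- ===== SOURCE B (Python) =====
-- def solution(S):
--     if 'aaa' in S:
--         return -1
--     return 2 * len(S) - 3 * S.count('a') + 2
-- ===== Notes on version B (the rewrite author's own statement) =====
-- stated objective: faster
-- what changed: Replaced A's loop that rebuilds a string (appending two a-characters plus each non-a character) and then re-counts occurrences in it by the closed form 2*len(S) - 3*(count of a) + 2, keeping the early -1 when three consecutive a-characters occur.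
import Mathlib
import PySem

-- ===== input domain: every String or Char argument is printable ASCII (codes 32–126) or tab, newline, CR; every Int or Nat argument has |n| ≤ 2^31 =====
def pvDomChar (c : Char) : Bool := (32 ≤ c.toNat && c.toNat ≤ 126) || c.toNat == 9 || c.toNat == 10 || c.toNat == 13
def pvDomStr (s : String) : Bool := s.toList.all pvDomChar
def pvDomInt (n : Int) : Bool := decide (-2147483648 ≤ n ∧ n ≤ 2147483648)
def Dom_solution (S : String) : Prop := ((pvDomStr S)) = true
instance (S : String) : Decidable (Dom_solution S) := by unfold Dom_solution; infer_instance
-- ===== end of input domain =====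

-- B replaces A's string rebuilding and re-counting by the closed form 2*len(S) - 3*count_a + 2 (objective: faster; no string building).

-- ===== PORT A =====
def solution (S : String) : Int :=
  let a : List Char := ['a', 'a']
  let count_a : Nat := PySem.Str.count S "a"
  let rewrite : List Char := []
  if PySem.Str.isIn "aaa" S then -1
  else
    let rewrite := S.toList.foldl (fun acc i => if i ≠ 'a' then acc ++ (a ++ [i]) else acc) rewrite
    let new_string := rewrite ++ a
    (PySem.Chars.count new_string ['a'] : Int) - (count_a : Int)

-- ===== PORT B =====
def solution_alt (S : String) : Int :=
  if PySem.Str.isIn "aaa" S then -1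
  else 2 * (PySem.Str.len S : Int) - 3 * (PySem.Str.count S "a" : Int) + 2

-- ===== PRECONDITION & SPEC =====
def Spec_solution (S : String) (out : Int) : Prop := out = solution_alt S
instance (S : String) (out : Int) : Decidable (Spec_solution S out) := by unfold Spec_solution; infer_instance

-- ===== CLAIM (what is proved, stated in full; the proofs are below) =====
def Claim_equal_solution : Prop := ∀ (S : String), Dom_solution S → Spec_solution S (solution S)

-- ===== LEMMAS AND PROOFS =====

-- count.go with a single-character needle is just List.count (enough fuel).
theorem count_go_single (c : Char) (cs : List Char) (fuel : Nat) (acc : Nat)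
    (h : cs.length ≤ fuel) :
    PySem.Chars.count.go [c] fuel cs acc = acc + cs.count c := by
  induction cs generalizing fuel acc with
  | nil => cases fuel <;> simp [PySem.Chars.count.go]
  | cons x t ih =>
    cases fuel with
    | zero => simp at h
    | succ n =>
      simp only [PySem.Chars.count.go]
      by_cases hx : c = x
      · subst hx
        simp [List.isPrefixOf, ih n (acc + 1) (by simpa using h)]
        omega
      · have hp : [c].isPrefixOf (x :: t) = false := by
          simp [List.isPrefixOf, hx]
        simp [hp, List.count_cons, ih n acc (by simpa using h)]
        exact fun hxc => hx hxc.symm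

theorem count_single (cs : List Char) (c : Char) :
    PySem.Chars.count cs [c] = cs.count c := by
  simp [PySem.Chars.count, count_go_single c cs cs.length 0 le_rfl]

-- the count of 'a' in A's rebuilt string: each non-'a' character contributes 'a','a',i.
theorem rewrite_count (cs : List Char) (acc : List Char) :
    (cs.foldl (fun acc i => if i ≠ 'a' then acc ++ (['a', 'a'] ++ [i]) else acc) acc).count 'a'
      = acc.count 'a' + 2 * (cs.length - cs.count 'a') := by
  induction cs generalizing acc with
  | nil => simp
  | cons x t ih =>
    have hle : t.count 'a' ≤ t.length := List.count_le_length
    rw [List.foldl_cons]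
    by_cases hx : x = 'a'
    · rw [if_neg (by simp [hx]), ih]
      simp [hx]
    · rw [if_pos hx, ih]
      simp [List.count_append, Ne.symm hx, hx]
      omega

-- ===== VERDICT (by name: the statement is the Claim_ definition above) =====
theorem solution_spec : Claim_equal_solution := by
  intro S _
  unfold Spec_solution solution solution_alt
  by_cases h : PySem.Str.isIn "aaa" S = true
  · rw [if_pos h, if_pos h]
  · rw [if_neg h, if_neg h]
    dsimp only
    have hc : PySem.Str.count S "a" = S.toList.count 'a' := by
      rw [PySem.Str.count_eq]
      simpa using count_single S.toList 'a'
    rw [count_single, List.count_append, rewrite_count, hc, PySem.Str.len_eq]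
    have hle : S.toList.count 'a' ≤ S.toList.length := List.count_le_length
    have hL : S.toList.length = S.length := String.length_toList
    simp
    omega
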